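-- pv_equiv track=rewrite | github.com/JackE3377/33_2029 | services/telegram_notifier.py | _wh_urgency
-- ===== SOURCE A (Python) =====
-- def _wh_urgency(wh_data: dict | None) -> int:
--     if not wh_data:
--         return 0
--     sigs = wh_data.get("wh_sigs", [])
--     if any(s.get("status") == "panic" for s in sigs):
--         return 3
--     if any(s.get("status") in ("hot", "cold", "momentum_off") for s in sigs):
--         return 2
--     return 0
-- ===== SOURCE B (Python) =====
-- def _wh_urgency(wh_data: dict | None) -> int:
--     if not wh_data:
--         return 0
--     level2 = False
--     for s in wh_data.get("wh_sigs", []):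
--         st = s.get("status")
--         if st == "panic":
--             return 3
--         if st in ("hot", "cold", "momentum_off"):
--             level2 = True
--     return 2 if level2 else 0
-- ===== Notes on version B (the rewrite author's own statement) =====
-- stated objective: alternative
-- what changed: Replaces A's two separate short-circuit any() scans over the signal list with a single pass that returns 3 immediately on a 'panic' status and carries a level-2 flag to the end, so the list is traversed at most once.
import Mathlib
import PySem

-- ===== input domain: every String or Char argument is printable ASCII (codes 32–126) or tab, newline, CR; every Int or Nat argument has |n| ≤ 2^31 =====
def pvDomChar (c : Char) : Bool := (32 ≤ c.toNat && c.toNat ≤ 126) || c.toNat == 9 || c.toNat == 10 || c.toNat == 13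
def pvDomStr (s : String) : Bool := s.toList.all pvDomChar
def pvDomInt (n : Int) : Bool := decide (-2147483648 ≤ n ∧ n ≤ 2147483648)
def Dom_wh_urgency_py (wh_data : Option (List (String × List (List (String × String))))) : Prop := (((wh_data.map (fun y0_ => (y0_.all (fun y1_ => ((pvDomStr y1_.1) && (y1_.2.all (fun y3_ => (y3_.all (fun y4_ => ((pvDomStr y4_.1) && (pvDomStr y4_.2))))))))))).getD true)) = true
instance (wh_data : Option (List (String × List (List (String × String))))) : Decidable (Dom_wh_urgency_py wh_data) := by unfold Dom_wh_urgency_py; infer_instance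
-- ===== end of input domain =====

-- B replaces A's two short-circuit any() scans with one pass carrying a level-2 flag
-- (return 3 immediately on 'panic'); alternative decomposition, same exact values.

-- ===== PORT A =====
def wh_urgency_py (wh_data : Option (List (String × List (List (String × String))))) : Int :=
  match wh_data with
  | none => 0
  | some d =>
    if d.isEmpty then 0
    else
      let sigs := PySem.Dict.getD (PySem.Dict.mk d) "wh_sigs" []
      if sigs.any (fun s => PySem.Dict.get? (PySem.Dict.mk s) "status" == some "panic") then 3
      else if sigs.any (fun s =>
          PySem.Dict.get? (PySem.Dict.mk s) "status" == some "hot" ||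
          PySem.Dict.get? (PySem.Dict.mk s) "status" == some "cold" ||
          PySem.Dict.get? (PySem.Dict.mk s) "status" == some "momentum_off") then 2
      else 0

-- ===== PORT B =====
-- One-pass loop of Source B: early 3 on panic, otherwise accumulate the level-2 flag.
def whUrgencyLoop : List (List (String × String)) → Bool → Int
  | [], level2 => if level2 then 2 else 0
  | s :: rest, level2 =>
    let st := PySem.Dict.get? (PySem.Dict.mk s) "status"
    if st == some "panic" then 3
    else whUrgencyLoop rest
      (level2 || (st == some "hot" || st == some "cold" || st == some "momentum_off"))

def wh_urgency_py_alt (wh_data : Option (List (String × List (List (String × String))))) : Int :=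
  match wh_data with
  | none => 0
  | some d =>
    if d.isEmpty then 0
    else whUrgencyLoop (PySem.Dict.getD (PySem.Dict.mk d) "wh_sigs" []) false

-- ===== PRECONDITION & SPEC =====
def Spec_wh_urgency_py (wh_data : Option (List (String × List (List (String × String))))) (out : Int) : Prop := out = wh_urgency_py_alt wh_data
instance (wh_data : Option (List (String × List (List (String × String))))) (out : Int) : Decidable (Spec_wh_urgency_py wh_data out) := by unfold Spec_wh_urgency_py; infer_instance

-- ===== CLAIM (what is proved, stated in full; the proofs are below) =====
def Claim_equal_wh_urgency_py : Prop := ∀ (wh_data : Option (List (String × List (List (String × String))))), Dom_wh_urgency_py wh_data → Spec_wh_urgency_py wh_data (wh_urgency_py wh_data)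

-- ===== LEMMAS AND PROOFS =====
theorem whUrgencyLoop_eq (sigs : List (List (String × String))) (flag : Bool) :
    whUrgencyLoop sigs flag =
      if sigs.any (fun s => PySem.Dict.get? (PySem.Dict.mk s) "status" == some "panic") then 3
      else if (flag || sigs.any (fun s =>
          PySem.Dict.get? (PySem.Dict.mk s) "status" == some "hot" ||
          PySem.Dict.get? (PySem.Dict.mk s) "status" == some "cold" ||
          PySem.Dict.get? (PySem.Dict.mk s) "status" == some "momentum_off")) then 2
      else 0 := by
  induction sigs generalizing flag with
  | nil => simp [whUrgencyLoop]
  | cons s rest ih =>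
    simp only [whUrgencyLoop, List.any_cons]
    by_cases h : (PySem.Dict.get? (PySem.Dict.mk s) "status" == some "panic") = true
    · simp [h]
    · rw [Bool.not_eq_true] at h
      simp only [h, Bool.false_or, Bool.false_eq_true, if_false]
      rw [ih]
      by_cases hp : (rest.any (fun s => PySem.Dict.get? (PySem.Dict.mk s) "status" == some "panic")) = true
      · simp [hp]
      · rw [Bool.not_eq_true] at hp
        simp only [hp, Bool.false_eq_true, if_false]
        congr 1
        simp [Bool.or_assoc, Bool.or_comm, Bool.or_left_comm]

-- ===== VERDICT (by name: the statement is the Claim_ definition above) =====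
theorem wh_urgency_py_spec : Claim_equal_wh_urgency_py := by
  intro wh_data _
  unfold Spec_wh_urgency_py wh_urgency_py wh_urgency_py_alt
  match wh_data with
  | none => rfl
  | some d =>
    by_cases h : d.isEmpty
    · simp [h]
    · rw [Bool.not_eq_true] at h
      simp only [h, Bool.false_eq_true, if_false]
      rw [whUrgencyLoop_eq]
      simp
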